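-- pv_equiv track=rewrite | github.com/filipixdb/ensemble-wisard-neural-nets | WNNEnsemble/data_process/file_reader.py | gera_combinacoes_features
-- ===== SOURCE A (Python) =====
-- from itertools import combinations
--
-- def gera_combinacoes_features(ranking, fixas, opcionais, sorteadas):
--     features_fixas = list(int(x) for x in ranking[0:fixas])
--     features_opcionais = list(int(x) for x in ranking[fixas:(fixas+opcionais)])
--     combinacoes = list(combinations(features_opcionais, sorteadas))
--
--     resultado = []
--     for combinacao in combinacoes:
--         temp = features_fixas[:]
--         temp.extend(list(combinacao))
--         resultado.append(temp)
--
--     return resultado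
-- ===== SOURCE B (Python) =====
-- def gera_combinacoes_features(ranking, fixas, opcionais, sorteadas):
--     features_fixas = [int(x) for x in ranking[0:fixas]]
--     opc = [int(x) for x in ranking[fixas:fixas + opcionais]]
--     if sorteadas < 0:
--         return []
--     n = len(opc)
--
--     def rec(start, k):
--         # index-based enumeration with the n-k pruning bound; lexicographic order
--         if k == 0:
--             return [[]]
--         out = []
--         for i in range(start, n - k + 1):
--             for rest in rec(i + 1, k - 1):
--                 out.append([opc[i]] + rest)
--         return out
--
--     return [features_fixas + comb for comb in rec(0, sorteadas)]
-- ===== Notes on version B (the rewrite author's own statement) =====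
-- stated objective: alternative
-- what changed: B replaces the itertools.combinations call (materialised tuple list plus a copy-and-extend loop) by its own recursive index-based enumerator with the n-k pruning bound, building each result list directly in one comprehension.
import Mathlib
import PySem

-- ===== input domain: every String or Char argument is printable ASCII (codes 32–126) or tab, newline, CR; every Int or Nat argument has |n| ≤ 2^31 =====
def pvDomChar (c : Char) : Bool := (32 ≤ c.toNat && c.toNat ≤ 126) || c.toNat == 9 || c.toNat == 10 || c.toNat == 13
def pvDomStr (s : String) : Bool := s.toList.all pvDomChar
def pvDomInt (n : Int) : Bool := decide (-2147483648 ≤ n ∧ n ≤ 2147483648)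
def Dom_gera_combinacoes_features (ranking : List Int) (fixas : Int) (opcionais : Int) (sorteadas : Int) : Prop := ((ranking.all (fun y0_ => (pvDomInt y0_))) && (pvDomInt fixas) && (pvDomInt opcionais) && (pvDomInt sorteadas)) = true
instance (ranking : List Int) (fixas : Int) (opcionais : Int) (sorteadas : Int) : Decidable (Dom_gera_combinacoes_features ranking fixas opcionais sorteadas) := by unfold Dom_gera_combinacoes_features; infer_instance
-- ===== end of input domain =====

-- B replaces the itertools.combinations call by an index-based recursive enumeration with the
-- n-k pruning bound (objective: alternative decomposition, same asymptotic cost).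
-- ===== PORT A =====
-- itertools.combinations(xs, k) in lexicographic order (pick the head or skip it)
def pvCombA (xs : List Int) (k : Nat) : List (List Int) :=
  match xs, k with
  | _, 0 => [[]]
  | [], _ + 1 => []
  | x :: r, k' + 1 => (pvCombA r k').map (fun c => x :: c) ++ pvCombA r (k' + 1)

def gera_combinacoes_features (ranking : List Int) (fixas : Int) (opcionais : Int) (sorteadas : Int) : List (List Int) :=
  -- int(x) on an int is the identity, so the two generator expressions are the plain slices
  let features_fixas := PySem.List.slice ranking (some 0) (some fixas)
  let features_opcionais := PySem.List.slice ranking (some fixas) (some (fixas + opcionais))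
  -- combinations raises ValueError for sorteadas < 0; those inputs are outside Pre_
  let combinacoes := pvCombA features_opcionais sorteadas.toNat
  combinacoes.foldl (fun resultado combinacao => resultado ++ [features_fixas ++ combinacao]) []

-- ===== PORT B =====
-- rec(start, k) of Source B: loop i over range(start, n-k+1), prepending opc[i] to each shorter pick.
-- opc[i] is ported as pyGetD (every index visited is in range, so no IndexError arises).
def pvAltRec (opc : List Int) (n : Int) (start : Int) : Nat → List (List Int)
  | 0 => [[]]
  | k + 1 =>
      (PySem.List.pyRange start (n - k) 1).flatMap
        (fun i => (pvAltRec opc n (i + 1) k).map (fun rest => PySem.List.pyGetD opc i 0 :: rest))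

def gera_combinacoes_features_alt (ranking : List Int) (fixas : Int) (opcionais : Int) (sorteadas : Int) : List (List Int) :=
  let features_fixas := PySem.List.slice ranking (some 0) (some fixas)
  let opc := PySem.List.slice ranking (some fixas) (some (fixas + opcionais))
  if sorteadas < 0 then []
  else
    let n : Int := opc.length
    (pvAltRec opc n 0 sorteadas.toNat).map (fun comb => features_fixas ++ comb)

-- ===== PRECONDITION & SPEC =====
-- A raises ValueError (from itertools.combinations) exactly when sorteadas < 0; nothing else is excluded.
def Pre_gera_combinacoes_features (ranking : List Int) (fixas : Int) (opcionais : Int) (sorteadas : Int) : Prop := 0 ≤ sorteadas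
instance (ranking : List Int) (fixas : Int) (opcionais : Int) (sorteadas : Int) : Decidable (Pre_gera_combinacoes_features ranking fixas opcionais sorteadas) := by unfold Pre_gera_combinacoes_features; infer_instance

def pvWitness_gera_combinacoes_features : List Int × Int × Int × Int := ([1, 2, 3, 4], 1, 3, 2)

def Spec_gera_combinacoes_features (ranking : List Int) (fixas : Int) (opcionais : Int) (sorteadas : Int) (out : List (List Int)) : Prop := out = gera_combinacoes_features_alt ranking fixas opcionais sorteadas
instance (ranking : List Int) (fixas : Int) (opcionais : Int) (sorteadas : Int) (out : List (List Int)) : Decidable (Spec_gera_combinacoes_features ranking fixas opcionais sorteadas out) := by unfold Spec_gera_combinacoes_features; infer_instance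

-- ===== CLAIM (what is proved, stated in full; the proofs are below) =====
def Claim_equal_gera_combinacoes_features : Prop := ∀ (ranking : List Int) (fixas : Int) (opcionais : Int) (sorteadas : Int), Dom_gera_combinacoes_features ranking fixas opcionais sorteadas → Pre_gera_combinacoes_features ranking fixas opcionais sorteadas → Spec_gera_combinacoes_features ranking fixas opcionais sorteadas (gera_combinacoes_features ranking fixas opcionais sorteadas)
-- ===== LEMMAS AND PROOFS =====

-- pruning: a list shorter than k has no k-combinations
lemma pvCombA_eq_nil_of_short (xs : List Int) (k : Nat) (h : xs.length < k) :
    pvCombA xs k = [] := by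
  induction xs generalizing k with
  | nil =>
    match k with
    | k' + 1 => rfl
  | cons x r ih =>
    match k with
    | k' + 1 =>
      simp only [pvCombA]
      have h1 : r.length < k' := by simpa using h
      rw [ih k' h1, ih (k' + 1) (Nat.lt_succ_of_lt h1)]
      simp

-- the index-based enumeration over opc starting at position s equals pick-or-skip on the suffix
lemma pvAltRec_eq_pvCombA (k : Nat) :
    ∀ (opc suf : List Int) (s : Nat), opc.drop s = suf →
      pvAltRec opc (opc.length : Int) (s : Int) k = pvCombA suf k := by
  induction k with
  | zero =>
    intro opc suf s _
    cases suf <;> rfl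
  | succ k ih =>
    intro opc suf
    induction suf generalizing opc with
    | nil =>
      intro s hd
      have hs : opc.length ≤ s := by
        have := congrArg List.length hd
        simp at this
        omega
      have hnil : PySem.List.pyRange (s : Int) ((opc.length : Int) - k) 1 = [] :=
        PySem.List.pyRange_one_eq_nil (by omega)
      simp [pvAltRec, hnil, pvCombA]
    | cons x rest ihs =>
      intro s hd
      have hlt : s < opc.length := by
        by_contra hge
        rw [List.drop_eq_nil_of_le (by omega)] at hd
        simp at hd
      have hdrop1 : opc.drop (s + 1) = rest := by
        rw [← List.tail_drop, hd]
        rfl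
      have hx : PySem.List.pyGetD opc (s : Int) 0 = x := by
        rw [PySem.List.pyGetD_natCast, List.getD_eq_getElem _ _ hlt]
        have h2 : (opc.drop s)[0]'(by simp [hd]) = x := by simp [hd]
        simpa using h2
      by_cases hc : s + (k + 1) ≤ opc.length
      · -- the range is nonempty: peel its head
        have hcons : PySem.List.pyRange (s : Int) ((opc.length : Int) - k) 1
            = (s : Int) :: PySem.List.pyRange ((s : Int) + 1) ((opc.length : Int) - k) 1 :=
          PySem.List.pyRange_one_cons (by omega)
        show (PySem.List.pyRange (s : Int) ((opc.length : Int) - k) 1).flatMap _ = _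
        rw [hcons, List.flatMap_cons]
        have htail : (PySem.List.pyRange ((s : Int) + 1) ((opc.length : Int) - k) 1).flatMap
              (fun i => (pvAltRec opc (opc.length : Int) (i + 1) k).map
                (fun rest => PySem.List.pyGetD opc i 0 :: rest))
            = pvAltRec opc (opc.length : Int) ((s : Int) + 1) (k + 1) := rfl
        rw [htail]
        have hcast : ((s : Int) + 1) = ((s + 1 : Nat) : Int) := by push_cast; ring
        rw [hcast, hx, ih opc rest (s + 1) hdrop1, ihs opc (s + 1) hdrop1]
        rfl
      · -- the range is empty and the suffix is too short
        have hnil : PySem.List.pyRange (s : Int) ((opc.length : Int) - k) 1 = [] :=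
          PySem.List.pyRange_one_eq_nil (by omega)
        have hshort : (x :: rest).length < k + 1 := by
          have := congrArg List.length hd
          simp at this
          simp
          omega
        show (PySem.List.pyRange (s : Int) ((opc.length : Int) - k) 1).flatMap _ = _
        rw [hnil, pvCombA_eq_nil_of_short _ _ hshort]
        rfl

-- appending one element per step is mapping
lemma foldl_append_map (ff : List Int) (l : List (List Int)) :
    ∀ acc, l.foldl (fun resultado combinacao => resultado ++ [ff ++ combinacao]) acc
      = acc ++ l.map (fun c => ff ++ c) := by
  induction l with
  | nil => intro acc; simp
  | cons c t ih => intro acc; simp [List.foldl, ih]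

-- ===== VERDICT (by name: the statement is the Claim_ definition above) =====
theorem gera_combinacoes_features_spec : Claim_equal_gera_combinacoes_features := by
  intro ranking fixas opcionais sorteadas _ hpre
  unfold Spec_gera_combinacoes_features gera_combinacoes_features gera_combinacoes_features_alt
  have hneg : ¬ sorteadas < 0 := by
    unfold Pre_gera_combinacoes_features at hpre; omega
  simp only [hneg, if_false]
  rw [foldl_append_map]
  have h := pvAltRec_eq_pvCombA sorteadas.toNat
    (PySem.List.slice ranking (some fixas) (some (fixas + opcionais)))
    (PySem.List.slice ranking (some fixas) (some (fixas + opcionais))) 0 (by simp)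
  simp only [Nat.cast_zero] at h
  rw [h]
  simp
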